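-- pv_equiv track=rewrite | github.com/skitela/potential-robot | TOOLS/auto_deployer_kontraktorzy_pl_v3.py | symbol_base
-- ===== SOURCE A (Python) =====
-- from typing import Any, Dict, Iterable, List, Optional, Protocol, Tuple
--
-- def symbol_base(sym: Any) -> str:
--     s = str(sym or "").strip().upper()
--     if not s:
--         return ""
--     for sep in (".", "-", "_"):
--         if sep in s:
--             s = s.split(sep, 1)[0]
--     return s
-- ===== SOURCE B (Python) =====
-- def symbol_base(sym) -> str:
--     s = str(sym or "").strip().upper()
--     if not s:
--         return ""
--     out = []
--     for ch in s:
--         if ch in "._-":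
--             break
--         out.append(ch)
--     return "".join(out)
-- ===== Notes on version B (the rewrite author's own statement) =====
-- stated objective: simpler
-- what changed: Replaces the three sequential split(sep,1)[0] truncations with one left-to-right character scan that stops at the first separator ('.', '-' or '_') and joins the collected prefix.
import Mathlib
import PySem

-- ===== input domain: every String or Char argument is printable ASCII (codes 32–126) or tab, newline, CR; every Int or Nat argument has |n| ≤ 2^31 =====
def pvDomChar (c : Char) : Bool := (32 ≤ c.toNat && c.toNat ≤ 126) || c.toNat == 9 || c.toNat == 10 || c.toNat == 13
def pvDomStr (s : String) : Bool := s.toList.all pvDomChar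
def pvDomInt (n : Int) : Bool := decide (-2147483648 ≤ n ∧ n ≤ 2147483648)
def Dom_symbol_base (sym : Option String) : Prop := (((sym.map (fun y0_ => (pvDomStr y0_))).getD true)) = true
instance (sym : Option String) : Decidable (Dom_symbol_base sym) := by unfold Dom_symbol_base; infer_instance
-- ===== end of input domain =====

-- B replaces the three sequential split-and-truncate passes with a single character scan
-- stopping at the first separator; same return value, stated and proved below (objective: simpler).

-- ===== PORT A =====
-- s.split(sep, 1)[0] guarded by 'sep in s', applied for sep in (".", "-", "_") in order
def symbol_base (sym : Option String) : String :=
  let s := PySem.Str.upper (PySem.Str.strip (sym.getD ""))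
  if s = "" then ""
  else
    [".", "-", "_"].foldl
      (fun s sep =>
        if PySem.Str.isIn sep s then
          (((PySem.Str.splitMax? s sep 1).getD []).headD "")
        else s) s

-- ===== PORT B =====
-- the 'for ch in s: if ch in "._-": break; out.append(ch)' loop of Source B
-- ('ch in "._-"' is exact char membership, ported as the three-way disjunction in string order)
def pvScan : List Char → List Char
  | [] => []
  | c :: rest => if c = '.' ∨ c = '_' ∨ c = '-' then [] else c :: pvScan rest

def symbol_base_alt (sym : Option String) : String :=
  let s := PySem.Str.upper (PySem.Str.strip (sym.getD ""))
  if s = "" then ""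
  else String.ofList (pvScan s.toList)

-- ===== PRECONDITION & SPEC =====
def Spec_symbol_base (sym : Option String) (out : String) : Prop := out = symbol_base_alt sym
instance (sym : Option String) (out : String) : Decidable (Spec_symbol_base sym out) := by unfold Spec_symbol_base; infer_instance

-- ===== CLAIM (what is proved, stated in full; the proofs are below) =====
def Claim_equal_symbol_base : Prop := ∀ (sym : Option String), Dom_symbol_base sym → Spec_symbol_base sym (symbol_base sym)

-- ===== LEMMAS AND PROOFS =====

-- m = 0: the remaining input is flushed in every branch of splitOnMax.go
theorem pv_go_zero (sep : List Char) (fuel : Nat) (l cur : List Char) (acc : List (List Char)) :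
    PySem.Chars.splitOnMax.go sep fuel 0 l cur acc = ((cur.reverse ++ l) :: acc).reverse := by
  cases fuel with
  | zero => rfl
  | succ f => cases l with
    | nil => simp [PySem.Chars.splitOnMax.go]
    | cons c rest => simp [PySem.Chars.splitOnMax.go]

-- m = 1, acc = []: the head of the split is the prefix before the first occurrence of c
theorem pv_go_one (c : Char) (l : List Char) (fuel : Nat) (cur : List Char)
    (h : l.length < fuel) :
    ((PySem.Chars.splitOnMax.go [c] fuel 1 l cur []).headD []) = cur.reverse ++ l.takeWhile (· ≠ c) := by
  induction l generalizing fuel cur with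
  | nil =>
    cases fuel with
    | zero => omega
    | succ f => simp [PySem.Chars.splitOnMax.go]
  | cons d rest ih =>
    cases fuel with
    | zero => omega
    | succ f =>
      by_cases hdc : d = c
      · subst hdc
        simp [PySem.Chars.splitOnMax.go, List.isPrefixOf, pv_go_zero]
      · have : [c].isPrefixOf (d :: rest) = false := by
          simp [List.isPrefixOf]; exact fun h' => (hdc h'.symm).elim
        rw [List.takeWhile_cons_of_pos (by simp [hdc])]
        simp only [PySem.Chars.splitOnMax.go, this]
        rw [if_neg (by omega : ¬ (1:Nat) = 0), if_neg (by simp : ¬ false = true)]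
        have hr : rest.length < f := by simpa using Nat.lt_of_succ_lt_succ h
        rw [ih f (d :: cur) hr]
        simp

-- one guarded truncation step of A, on strings, for a single-character separator
theorem pv_cut_eq (s : String) (c : Char) :
    (if PySem.Str.isIn (String.ofList [c]) s then
        (((PySem.Str.splitMax? s (String.ofList [c]) 1).getD []).headD "")
      else s) = String.ofList (s.toList.takeWhile (· ≠ c)) := by
  by_cases h : PySem.Str.isIn (String.ofList [c]) s
  · simp only [h, if_pos]
    have hmap := PySem.Str.splitMax?_map s (String.ofList [c]) 1
    have htl : (String.ofList [c]).toList = [c] := by simp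
    rw [htl] at hmap
    have hsome : PySem.Chars.splitMax? s.toList [c] 1
        = some (PySem.Chars.splitOnMax s.toList [c] 1) := by
      simp [PySem.Chars.splitMax?]
    rw [hsome] at hmap
    cases hsp : PySem.Str.splitMax? s (String.ofList [c]) 1 with
      | none => rw [hsp] at hmap; simp at hmap
      | some parts =>
        rw [hsp] at hmap
        simp only [Option.map_some, Option.some.injEq] at hmap
        have hchars : PySem.Chars.splitOnMax s.toList [c] 1 =
            PySem.Chars.splitOnMax.go [c] (s.toList.length + 1) 1 s.toList [] [] := by
          simp [PySem.Chars.splitOnMax]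
        have hgo := pv_go_one c s.toList (s.toList.length + 1) [] (by omega)
        rw [← hchars, ← hmap] at hgo
        simp only [List.reverse_nil, List.nil_append] at hgo
        cases parts with
        | nil =>
          simp only [List.map_nil, List.headD_nil] at hgo
          rw [← hgo]
          rfl
        | cons p ps =>
          simp only [Option.getD_some, List.headD_cons]
          simp only [List.map_cons, List.headD_cons] at hgo
          rw [← hgo]
          exact String.ofList_toList.symm
  · have hni : ¬ ([c] <:+: s.toList) := by
      have := PySem.Str.isIn_iff_infix (String.ofList [c]) s
      simp only [String.toList_ofList] at this
      intro hc
      exact h (this.mpr hc)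
    have hnm : c ∉ s.toList := fun hm => hni ((List.singleton_infix_iff c s.toList).mpr hm)
    have hself : s.toList.takeWhile (· ≠ c) = s.toList :=
      List.takeWhile_eq_self_iff.mpr (fun x hx => by simp; exact fun he => hnm (he ▸ hx))
    rw [if_neg h, hself, String.ofList_toList]

-- B's scan is the three nested takeWhile truncations of A, in one pass
theorem pv_scan_eq (t : List Char) :
    pvScan t = ((t.takeWhile (· ≠ '.')).takeWhile (· ≠ '-')).takeWhile (· ≠ '_') := by
  induction t with
  | nil => rfl
  | cons d rest ih =>
    by_cases h1 : d = '.'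
    · subst h1; simp [pvScan]
    · by_cases h2 : d = '_'
      · subst h2; simp [pvScan]
      · by_cases h3 : d = '-'
        · subst h3; simp [pvScan]
        · rw [List.takeWhile_cons_of_pos (by simp [h1]),
              List.takeWhile_cons_of_pos (by simp [h3]),
              List.takeWhile_cons_of_pos (by simp [h2])]
          simp only [pvScan, if_neg (by tauto : ¬ (d = '.' ∨ d = '_' ∨ d = '-'))]
          rw [ih]

-- ===== VERDICT (by name: the statement is the Claim_ definition above) =====
theorem symbol_base_spec : Claim_equal_symbol_base := by
  intro sym _
  unfold Spec_symbol_base symbol_base symbol_base_alt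
  dsimp only
  generalize PySem.Str.upper (PySem.Str.strip (sym.getD "")) = s
  by_cases h0 : s = ""
  · rw [if_pos h0, if_pos h0]
  · rw [if_neg h0, if_neg h0]
    simp only [List.foldl_cons, List.foldl_nil]
    have hdot : ("." : String) = String.ofList ['.'] := rfl
    have hdash : ("-" : String) = String.ofList ['-'] := rfl
    have hund : ("_" : String) = String.ofList ['_'] := rfl
    rw [hdot, hdash, hund]
    rw [pv_cut_eq s '.']
    rw [pv_cut_eq (String.ofList (s.toList.takeWhile (· ≠ '.'))) '-']
    rw [pv_cut_eq _ '_']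
    rw [pv_scan_eq]
    simp only [String.toList_ofList]
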